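-- pv_equiv track=rewrite | github.com/arnav-exe/giga-mcp | src/giga_mcp/discovery/authority.py | _pypi_repository_url
-- ===== SOURCE A (Python) =====
-- def _normalize_url(raw):
--     if not raw:
--         return None
--     value = raw.strip()
--     if value.startswith("git+"):
--         value = value[4:]
--     if value.endswith(".git"):
--         value = value[:-4]
--     return value
--
-- def _normalize_project_urls(project_urls):
--     if not isinstance(project_urls, dict):
--         return {}
--     normalized = {}
--     for key, value in project_urls.items():
--         if not key:
--             continue
--         url = _normalize_url(value)
--         if url:
--             normalized[key] = url
--     return normalized
--
-- def _pypi_repository_url(project_urls, home_page):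
--     urls = _normalize_project_urls(project_urls)
--     for key in urls:
--         if "repo" in key.lower() or "source" in key.lower() or "code" in key.lower():
--             return urls[key]
--     for value in urls.values():
--         if "github.com" in value.lower():
--             return value
--     return _normalize_url(home_page)
-- ===== SOURCE B (Python) =====
-- def _normalize_url(raw):
--     if not raw:
--         return None
--     value = raw.strip()
--     if value.startswith("git+"):
--         value = value[4:]
--     if value.endswith(".git"):
--         value = value[:-4]
--     return value
--
-- def _normalize_project_urls(project_urls):
--     if not isinstance(project_urls, dict):
--         return {}
--     normalized = {}
--     for key, value in project_urls.items():
--         if not key: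
--             continue
--         url = _normalize_url(value)
--         if url:
--             normalized[key] = url
--     return normalized
--
-- def _pypi_repository_url(project_urls, home_page):
--     github_fallback = None
--     for key, value in _normalize_project_urls(project_urls).items():
--         low = key.lower()
--         if "repo" in low or "source" in low or "code" in low:
--             return value
--         if github_fallback is None and "github.com" in value.lower():
--             github_fallback = value
--     if github_fallback is not None:
--         return github_fallback
--     return _normalize_url(home_page)
-- ===== Notes on version B (the rewrite author's own statement) =====
-- stated objective: simpler
-- what changed: A's two sequential scans over the normalized dict (first for repo/source/code keys, then for github.com values) are fused into a single pass over its items that returns on a repo-like key and stashes the first github.com value as a fallback returned after the loop.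
import Mathlib
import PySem

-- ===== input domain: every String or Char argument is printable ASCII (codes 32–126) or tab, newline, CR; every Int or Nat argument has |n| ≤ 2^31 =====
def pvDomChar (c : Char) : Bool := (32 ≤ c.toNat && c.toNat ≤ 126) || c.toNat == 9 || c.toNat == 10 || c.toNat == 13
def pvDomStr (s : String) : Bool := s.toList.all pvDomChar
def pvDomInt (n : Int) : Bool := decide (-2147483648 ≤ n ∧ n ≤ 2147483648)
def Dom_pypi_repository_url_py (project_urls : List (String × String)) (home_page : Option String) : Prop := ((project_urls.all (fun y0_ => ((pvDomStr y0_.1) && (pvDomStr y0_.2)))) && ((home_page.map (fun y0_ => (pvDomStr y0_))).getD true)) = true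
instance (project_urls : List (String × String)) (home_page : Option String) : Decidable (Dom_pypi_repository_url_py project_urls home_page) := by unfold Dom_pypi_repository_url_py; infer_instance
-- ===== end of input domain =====

-- B fuses A's two scans over the normalized dict into one pass with a github fallback; same result, simpler control flow.

-- ===== PORT A =====
-- shared module helper _normalize_url (used verbatim by both Pythons)
def normalizeUrl (raw : Option String) : Option String :=
  match raw with
  | none => none
  | some s =>
    if s = "" then none
    else
      let value := PySem.Str.strip s
      let value := if PySem.Str.startswith value "git+" then PySem.Str.slice value (some 4) none else value
      let value := if PySem.Str.endswith value ".git" then PySem.Str.slice value none (some (-4)) else value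
      some value

-- shared module helper _normalize_project_urls (used verbatim by both Pythons);
-- the assoc-list parameter denotes a Python dict, so it is read as one first (PySem.Dict.ofList)
def normalizeProjectUrls (project_urls : List (String × String)) : PySem.Dict String String :=
  (PySem.Dict.ofList project_urls).items.foldl
    (fun acc kv =>
      if kv.1 = "" then acc
      else
        match normalizeUrl (some kv.2) with
        | none => acc
        | some url => if url = "" then acc else acc.insert kv.1 url)
    PySem.Dict.empty

def condRepo (k : String) : Bool :=
  PySem.Str.isIn "repo" (PySem.Str.lower k) || PySem.Str.isIn "source" (PySem.Str.lower k) ||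
    PySem.Str.isIn "code" (PySem.Str.lower k)

def ghCond (v : String) : Bool := PySem.Str.isIn "github.com" (PySem.Str.lower v)

-- first loop of A: for key in urls: if repo-ish: return urls[key]
def loopKeys (urls : PySem.Dict String String) : List String → Option String
  | [] => none
  | k :: rest => if condRepo k then urls.get? k else loopKeys urls rest

-- second loop of A: for value in urls.values(): if github.com in it: return it
def loopVals : List String → Option String
  | [] => none
  | v :: rest => if ghCond v then some v else loopVals rest

def pypi_repository_url_py (project_urls : List (String × String)) (home_page : Option String) : Option String :=
  let urls := normalizeProjectUrls project_urls
  match loopKeys urls urls.keys with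
  | some v => some v
  | none =>
    match loopVals urls.values with
    | some v => some v
    | none => normalizeUrl home_page

-- ===== PORT B =====
-- single pass over the normalized items, carrying the github fallback
def scanItems : List (String × String) → Option String → Option String
  | [], fb => fb
  | (k, v) :: rest, fb =>
    let low := PySem.Str.lower k
    if PySem.Str.isIn "repo" low || PySem.Str.isIn "source" low || PySem.Str.isIn "code" low then some v
    else
      scanItems rest
        (match fb with
         | some _ => fb
         | none => if PySem.Str.isIn "github.com" (PySem.Str.lower v) then some v else none)

def pypi_repository_url_py_alt (project_urls : List (String × String)) (home_page : Option String) : Option String :=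
  match scanItems (normalizeProjectUrls project_urls).items none with
  | some v => some v
  | none => normalizeUrl home_page

-- ===== PRECONDITION & SPEC =====
def Spec_pypi_repository_url_py (project_urls : List (String × String)) (home_page : Option String) (out : Option String) : Prop := out = pypi_repository_url_py_alt project_urls home_page
instance (project_urls : List (String × String)) (home_page : Option String) (out : Option String) : Decidable (Spec_pypi_repository_url_py project_urls home_page out) := by unfold Spec_pypi_repository_url_py; infer_instance

-- ===== CLAIM (what is proved, stated in full; the proofs are below) =====
def Claim_equal_pypi_repository_url_py : Prop := ∀ (project_urls : List (String × String)) (home_page : Option String), Dom_pypi_repository_url_py project_urls home_page → Spec_pypi_repository_url_py project_urls home_page (pypi_repository_url_py project_urls home_page)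

-- ===== LEMMAS AND PROOFS =====

theorem scanItems_cons (k v : String) (rest : List (String × String)) (fb : Option String) :
    scanItems ((k, v) :: rest) fb =
      if condRepo k then some v
      else
        scanItems rest
          (match fb with
           | some _ => fb
           | none => if ghCond v then some v else none) := rfl

-- first-match lookup in pre ++ (k,v)::t hits (k,v) when no key of pre equals k
theorem get?_append_not_mem (pre t : List (String × String)) (k v : String)
    (h : ∀ p ∈ pre, p.1 ≠ k) :
    (PySem.Dict.mk (pre ++ (k, v) :: t)).get? k = some v := by
  induction pre with
  | nil => simp [PySem.Dict.get?_mk_cons]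
  | cons p ps ih =>
    rw [List.cons_append, PySem.Dict.get?_mk_cons]
    have hp : p.1 ≠ k := h p (by simp)
    simp only [beq_iff_eq, if_neg hp]
    exact ih (fun q hq => h q (by simp [hq]))

theorem loopVals_append_one (xs : List String) (v : String) :
    loopVals (xs ++ [v]) =
      (match loopVals xs with
       | some w => some w
       | none => if ghCond v then some v else none) := by
  induction xs with
  | nil => simp [loopVals]
  | cons x t ih =>
    by_cases hx : ghCond x = true <;> simp [loopVals, hx, ih]

theorem scan_main (l : List (String × String)) : ∀ (pre : List (String × String)) (fb h : Option String),
    (∀ p ∈ pre, condRepo p.1 = false) →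
    fb = loopVals (pre.map Prod.snd) →
    (match scanItems l fb with
     | some v => some v
     | none => h)
    = (match loopKeys (PySem.Dict.mk (pre ++ l)) (l.map Prod.fst) with
       | some v => some v
       | none =>
         match loopVals ((pre ++ l).map Prod.snd) with
         | some v => some v
         | none => h) := by
  induction l with
  | nil =>
    intro pre fb h hpre hfb
    subst hfb
    cases hlv : loopVals (pre.map Prod.snd) <;>
      simp [scanItems, loopKeys, hlv]
  | cons kv t ih =>
    obtain ⟨k, v⟩ := kv
    intro pre fb h hpre hfb
    subst hfb
    rw [scanItems_cons]
    by_cases hc : condRepo k = true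
    · have hkeys : ∀ p ∈ pre, p.1 ≠ k := by
        intro p hp he
        have hf := hpre p hp
        rw [he, hc] at hf
        simp at hf
      rw [if_pos hc]
      simp only [List.map_cons, loopKeys]
      rw [if_pos hc, get?_append_not_mem pre t k v hkeys]
    · have hpre' : ∀ p ∈ pre ++ [(k, v)], condRepo p.1 = false := by
        intro p hp
        rcases List.mem_append.mp hp with h1 | h2
        · exact hpre p h1
        · simp at h2; subst h2; simpa using hc
      have hfb' :
          (match loopVals (pre.map Prod.snd) with
           | some _ => loopVals (pre.map Prod.snd)
           | none => if ghCond v then some v else none)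
          = loopVals ((pre ++ [(k, v)]).map Prod.snd) := by
        simp only [List.map_append, List.map_cons, List.map_nil]
        rw [loopVals_append_one]
        cases loopVals (pre.map Prod.snd) <;> rfl
      rw [if_neg hc]
      have hih := ih (pre ++ [(k, v)]) _ h hpre' hfb'
      rw [List.append_assoc] at hih
      simp only [List.singleton_append] at hih
      rw [hih]
      simp only [List.map_cons, loopKeys]
      rw [if_neg hc]

-- ===== VERDICT (by name: the statement is the Claim_ definition above) =====
theorem pypi_repository_url_py_spec : Claim_equal_pypi_repository_url_py := by
  intro project_urls home_page _
  unfold Spec_pypi_repository_url_py pypi_repository_url_py pypi_repository_url_py_alt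
  have hmain := scan_main (normalizeProjectUrls project_urls).items [] none (normalizeUrl home_page)
    (by simp) (by simp [loopVals])
  have hd : PySem.Dict.mk ([] ++ (normalizeProjectUrls project_urls).items) = normalizeProjectUrls project_urls := by
    cases normalizeProjectUrls project_urls; rfl
  rw [hd] at hmain
  simp only [List.nil_append] at hmain
  rw [hmain]
  rfl
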